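-- pv_equiv track=rewrite | github.com/ramsharangajurel-31/Python_Tutorial | Information security/2.py | separate_same_letters
-- ===== SOURCE A (Python) =====
-- def separate_same_letters(message):
--     index = 0
--     while index < len(message):
--         l1 = message[index]
--         if index == len(message) - 1:
--             message += 'X'
--             break
--         l2 = message[index + 1]
--         if l1 == l2:
--             message = message[:index + 1] + "X" + message[index + 1:]
--         index += 2
--     return message
-- ===== SOURCE B (Python) =====
-- def separate_same_letters(message):
--     out = []
--     i = 0
--     n = len(message)
--     while i < n:
--         if i == n - 1:
--             out.append(message[i])
--             out.append('X')
--             break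
--         if message[i] == message[i + 1]:
--             out.append(message[i])
--             out.append('X')
--             i += 1
--         else:
--             out.append(message[i])
--             out.append(message[i + 1])
--             i += 2
--     return ''.join(out)
-- ===== Notes on version B (the rewrite author's own statement) =====
-- stated objective: faster
-- what changed: A repeatedly rebuilds the whole string by slicing on every duplicate pair; B makes one forward pass over the original string with an index pointer (advance 1 on a duplicate pair, 2 otherwise), appending to an output list joined once.
import Mathlib
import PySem

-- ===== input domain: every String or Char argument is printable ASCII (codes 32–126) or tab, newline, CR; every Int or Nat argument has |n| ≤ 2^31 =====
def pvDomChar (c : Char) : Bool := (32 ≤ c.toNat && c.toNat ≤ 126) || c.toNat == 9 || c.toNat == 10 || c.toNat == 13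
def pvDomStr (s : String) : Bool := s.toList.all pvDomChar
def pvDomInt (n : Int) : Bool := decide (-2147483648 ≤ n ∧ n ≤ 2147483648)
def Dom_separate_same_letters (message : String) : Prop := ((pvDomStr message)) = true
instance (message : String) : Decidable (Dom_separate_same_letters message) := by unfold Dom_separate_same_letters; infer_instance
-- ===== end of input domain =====

-- B replaces A's quadratic slice-and-rebuild loop by a single forward pass over the
-- original string, appending to an output list; this is the asymptotic speed-up.

-- ===== PORT A =====
-- A's loop: index steps by 2 over a string it rebuilds by slicing.  message[:index+1]
-- and message[index+1:] with the nonnegative in-range bound index+1 are exactly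
-- take/drop (PySem.List.slice_to_natCast / slice_from_natCast); message[index] and
-- message[index+1] are in range thanks to the loop guard and the not-last branch.
def pvLoopA (msg : List Char) (index : Nat) : List Char :=
  if h : index < msg.length then
    let l1 := msg[index]
    if hlast : index = msg.length - 1 then
      msg ++ ['X']
    else
      have h2 : index + 1 < msg.length := by omega
      let l2 := msg[index + 1]
      if l1 == l2 then
        pvLoopA (msg.take (index + 1) ++ 'X' :: msg.drop (index + 1)) (index + 2)
      else
        pvLoopA msg (index + 2)
  else msg
termination_by msg.length - index
decreasing_by
  · simp only [List.length_append, List.length_take, List.length_cons, List.length_drop]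
    omega
  · omega

def separate_same_letters (message : String) : String :=
  String.ofList (pvLoopA message.toList 0)

-- ===== PORT B =====
-- B's single pass: pointer i over the ORIGINAL string, out is the accumulated output.
def pvLoopB (msg : List Char) (i : Nat) (out : List Char) : List Char :=
  if h : i < msg.length then
    if hlast : i = msg.length - 1 then
      out ++ [msg[i], 'X']
    else
      have h2 : i + 1 < msg.length := by omega
      if msg[i] == msg[i + 1] then
        pvLoopB msg (i + 1) (out ++ [msg[i], 'X'])
      else
        pvLoopB msg (i + 2) (out ++ [msg[i], msg[i + 1]])
  else out
termination_by msg.length - i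

def separate_same_letters_alt (message : String) : String :=
  String.ofList (pvLoopB message.toList 0 [])

-- ===== PRECONDITION & SPEC =====
def Spec_separate_same_letters (message : String) (out : String) : Prop := out = separate_same_letters_alt message
instance (message : String) (out : String) : Decidable (Spec_separate_same_letters message out) := by unfold Spec_separate_same_letters; infer_instance

-- ===== CLAIM (what is proved, stated in full; the proofs are below) =====
def Claim_equal_separate_same_letters : Prop := ∀ (message : String), Dom_separate_same_letters message → Spec_separate_same_letters message (separate_same_letters message)

-- ===== LEMMAS AND PROOFS =====

-- The common mathematical description of both programs: process the remaining
-- characters, inserting 'X' after the first of an equal pair (then re-pair from the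
-- second), padding a lone final character with 'X'.
def pvSep : List Char → List Char
  | [] => []
  | [a] => [a, 'X']
  | a :: b :: rest =>
    if a == b then a :: 'X' :: pvSep (b :: rest)
    else a :: b :: pvSep rest
termination_by l => l.length

theorem pvSep_nil : pvSep [] = [] := by rw [pvSep]

theorem pvSep_one (a : Char) : pvSep [a] = [a, 'X'] := by rw [pvSep]

theorem pvSep_cons₂ (a b : Char) (rest : List Char) :
    pvSep (a :: b :: rest)
      = if a == b then a :: 'X' :: pvSep (b :: rest) else a :: b :: pvSep rest := by
  rw [pvSep]

theorem pvLoopB_eq (msg : List Char) (i : Nat) (out : List Char) :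
    pvLoopB msg i out = out ++ pvSep (msg.drop i) := by
  induction i, out using pvLoopB.induct msg with
  | case1 out h =>
    have hdrop : msg.drop (msg.length - 1) = [msg[msg.length - 1]] := by
      rw [List.drop_eq_getElem_cons h, List.drop_eq_nil_of_le (by omega)]
    rw [pvLoopB]
    simp [h, hdrop, pvSep_one]
  | case2 i out h hlast h2 heq ih =>
    have hdrop1 : msg.drop (i + 1) = msg[i+1] :: msg.drop (i + 2) :=
      List.drop_eq_getElem_cons h2
    have hdrop : msg.drop i = msg[i] :: msg.drop (i + 1) := List.drop_eq_getElem_cons h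
    rw [pvLoopB]
    simp only [h, hlast, heq, dif_pos, if_pos, ih]
    rw [hdrop, hdrop1, pvSep_cons₂, if_pos heq, ← hdrop1]
    simp
  | case3 i out h hlast h2 hne ih =>
    have hdrop : msg.drop i = msg[i] :: msg[i+1] :: msg.drop (i + 2) := by
      rw [List.drop_eq_getElem_cons h, List.drop_eq_getElem_cons h2]
    rw [pvLoopB]
    simp only [h, hlast, hne, dif_pos, ih]
    rw [hdrop, pvSep_cons₂, if_neg hne]
    simp
  | case4 i out h =>
    rw [pvLoopB]
    simp [h, List.drop_eq_nil_of_le (by omega : msg.length ≤ i), pvSep_nil]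

theorem pvLoopA_eq (msg : List Char) (i : Nat) :
    pvLoopA msg i = msg.take i ++ pvSep (msg.drop i) := by
  induction msg, i using pvLoopA.induct with
  | case1 msg h =>
    have hdrop : msg.drop (msg.length - 1) = [msg[msg.length - 1]] := by
      rw [List.drop_eq_getElem_cons h, List.drop_eq_nil_of_le (by omega)]
    rw [pvLoopA]
    simp only [h, dif_pos, hdrop, pvSep_one]
    have e : msg.length - 1 + 1 = msg.length := by omega
    rw [show [msg[msg.length - 1], 'X'] = [msg[msg.length - 1]] ++ ['X'] from rfl,
      ← List.append_assoc, List.take_append_getElem h, e, List.take_length]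
  | case2 msg i h l1 hlast h2 l2 heq ih =>
    have hlen : (msg.take (i + 1)).length = i + 1 := by simp; omega
    have htake : (msg.take (i + 1) ++ 'X' :: msg.drop (i + 1)).take (i + 2)
        = msg.take (i + 1) ++ ['X'] := by
      rw [List.take_append, List.take_of_length_le (by omega), hlen]
      simp
    have hdrop2 : (msg.take (i + 1) ++ 'X' :: msg.drop (i + 1)).drop (i + 2)
        = msg.drop (i + 1) := by
      rw [List.drop_append, List.drop_eq_nil_of_le (by omega), hlen]
      simp
    have htakes : msg.take (i + 1) = msg.take i ++ [msg[i]] :=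
      (List.take_append_getElem h).symm
    have hdrop : msg.drop i = msg[i] :: msg.drop (i + 1) := List.drop_eq_getElem_cons h
    have hdrop1 : msg.drop (i + 1) = msg[i+1] :: msg.drop (i + 2) :=
      List.drop_eq_getElem_cons h2
    have heq' : msg[i] = msg[i+1] := by simpa using heq
    rw [pvLoopA]
    simp only [h, hlast, dif_pos, ih, htake, hdrop2]
    rw [htakes, hdrop, hdrop1, pvSep_cons₂, ← hdrop1]
    simp [heq']
  | case3 msg i h l1 hlast h2 l2 hne ih =>
    have hdrop : msg.drop i = msg[i] :: msg[i+1] :: msg.drop (i + 2) := by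
      rw [List.drop_eq_getElem_cons h, List.drop_eq_getElem_cons h2]
    have htakes : msg.take (i + 2) = msg.take i ++ [msg[i], msg[i+1]] := by
      rw [← List.take_append_getElem h2, ← List.take_append_getElem h,
        List.append_assoc]
      rfl
    have hne' : ¬ msg[i] = msg[i+1] := by simpa using hne
    rw [pvLoopA]
    simp only [h, hlast, dif_pos, ih, htakes]
    rw [hdrop, pvSep_cons₂]
    simp [hne']
  | case4 msg i h =>
    rw [pvLoopA]
    simp [h, List.drop_eq_nil_of_le (le_of_not_gt h), pvSep_nil,
      List.take_of_length_le (le_of_not_gt h)]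

-- ===== VERDICT (by name: the statement is the Claim_ definition above) =====
theorem separate_same_letters_spec : Claim_equal_separate_same_letters := by
  intro message _
  unfold Spec_separate_same_letters separate_same_letters separate_same_letters_alt
  rw [pvLoopA_eq, pvLoopB_eq]
  simp
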